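-- pv_equiv track=rewrite | github.com/wrmem/RAMEN | ParserModules/sub_config_template.py | function
-- ===== SOURCE A (Python) =====
-- def function(device_output):
--
-- 	#User-defined variables
-- 	parent_command = "interface GigabitEthernet1/0/10"
-- 	subcommand = "speed 100"
-- 	fixit = ""	#Optionally, specify a fixit script if you have written one
--
-- 	#Do not change below here
-- 	device_lines = device_output.splitlines()
-- 	valid = ""
-- 	comment = ""
-- 	spurious = ""
-- 	sub_config = []
-- 	check1 = "Failed"
-- 	check2 = "Failed"
-- 	# Find the parent command
-- 	for i in device_lines:
-- 		if i.strip() == parent_command: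
-- 			#Found the parent command
-- 			check1 = "Ok"
-- 			# Extract the sub config
-- 			q = device_lines.index(i) + 1
-- 			for j in device_lines[q:]:
-- 				if j.startswith(" "):
-- 					sub_config.append(j)
-- 				else:
-- 					break
-- 			break
--
-- 	# Check contents of sub_config for the sub-command
-- 	if len(sub_config) > 0:
-- 		for l in sub_config:
-- 			if l.strip() == subcommand:
-- 				check2 = "Ok"
--
-- 	# Validate the above
-- 	if check1 != "Ok":
-- 		if comment == "":
-- 			comment = "Parent command not found"
-- 		else:
-- 			comment = comment + "\r\nParent command not found"
-- 		valid = "Failed"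
-- 	if check2 != "Ok":
-- 		if comment == "":
-- 			comment = "Sub command not found"
-- 		else:
-- 			comment = comment + "\r\nSub command not found"
-- 		valid = "Failed"
--
-- 	if check1 == "Ok" and check2 == "Ok":
-- 		valid = "Ok"
--
-- 	return valid, comment, fixit, spurious
-- ===== SOURCE B (Python) =====
-- def function(device_output):
--     parent_command = "interface GigabitEthernet1/0/10"
--     subcommand = "speed 100"
--     check1 = "Failed"
--     check2 = "Failed"
--     in_block = False
--     for line in device_output.splitlines():
--         if in_block:
--             if line.startswith(" "):
--                 if line.strip() == subcommand:
--                     check2 = "Ok"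
--             else:
--                 break
--         elif line.strip() == parent_command:
--             check1 = "Ok"
--             in_block = True
--     comments = []
--     if check1 != "Ok":
--         comments.append("Parent command not found")
--     if check2 != "Ok":
--         comments.append("Sub command not found")
--     comment = "\r\n".join(comments)
--     valid = "Ok" if not comments else "Failed"
--     return valid, comment, "", ""
-- ===== Notes on version B (the rewrite author's own statement) =====
-- stated objective: simpler
-- what changed: Replaced A's find-then-index-then-slice-then-rescan structure (outer search loop, list.index, slice copy, separate sub_config pass and incremental comment/valid patching) with one linear pass over the lines using an in_block flag, assembling comment/valid once from a list at the end.
import Mathlib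
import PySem

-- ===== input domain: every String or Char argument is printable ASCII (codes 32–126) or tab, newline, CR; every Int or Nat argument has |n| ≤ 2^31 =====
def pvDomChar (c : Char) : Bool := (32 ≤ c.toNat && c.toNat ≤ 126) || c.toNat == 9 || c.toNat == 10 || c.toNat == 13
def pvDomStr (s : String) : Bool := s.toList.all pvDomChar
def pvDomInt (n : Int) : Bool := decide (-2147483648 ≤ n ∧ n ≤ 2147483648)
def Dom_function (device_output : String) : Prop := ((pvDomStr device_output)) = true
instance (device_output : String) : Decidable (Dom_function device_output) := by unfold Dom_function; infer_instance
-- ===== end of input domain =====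

-- B replaces A's find/index/slice/rescan structure with one linear pass using an in_block flag (objective: simpler).

-- ===== PORT A =====
def pvParent : String := "interface GigabitEthernet1/0/10"
def pvSub : String := "speed 100"

-- A's inner loop: collect indented lines until the first non-indented one (break)
def pvInnerA : List String → List String
  | [] => []
  | j :: rest => if PySem.Str.startswith j " " then j :: pvInnerA rest else []

-- A's outer loop: scan for the parent command; on the first hit compute q = index(i)+1,
-- slice device_lines[q:] and collect the sub config, then break
def pvOuterA (all : List String) : List String → String × List String
  | [] => ("Failed", [])
  | i :: rest =>
    if PySem.Str.strip i = pvParent then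
      match PySem.List.index? all i with
      | some q => ("Ok", pvInnerA (PySem.List.slice all (some ((q : Int) + 1)) none))
      | none => ("Ok", [])   -- unreachable: i was taken from all, so index? finds it
    else pvOuterA all rest

-- A's check2 loop over sub_config (guarded by len(sub_config) > 0)
def pvCheck2A (sub_config : List String) : String :=
  if sub_config.length > 0 then
    sub_config.foldl (fun acc l => if PySem.Str.strip l = pvSub then "Ok" else acc) "Failed"
  else "Failed"

def function (device_output : String) : String × String × String × String :=
  let device_lines := PySem.Str.splitlines device_output
  let res := pvOuterA device_lines device_lines
  let check1 := res.1
  let check2 := pvCheck2A res.2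
  let comment : String := ""
  let valid : String := ""
  let cv1 : String × String :=
    if check1 ≠ "Ok" then
      ((if comment = "" then "Parent command not found"
        else comment ++ "\r\n" ++ "Parent command not found"), "Failed")
    else (comment, valid)
  let cv2 : String × String :=
    if check2 ≠ "Ok" then
      ((if cv1.1 = "" then "Sub command not found"
        else cv1.1 ++ "\r\n" ++ "Sub command not found"), "Failed")
    else cv1
  let valid' := if check1 = "Ok" ∧ check2 = "Ok" then "Ok" else cv2.2
  (valid', cv2.1, "", "")

-- ===== PORT B =====
-- B's single loop with the in_block flag
def pvScanB : List String → Bool → String → String → String × String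
  | [], _, c1, c2 => (c1, c2)
  | l :: rest, inb, c1, c2 =>
    if inb then
      if PySem.Str.startswith l " " then
        pvScanB rest true c1 (if PySem.Str.strip l = pvSub then "Ok" else c2)
      else (c1, c2)
    else if PySem.Str.strip l = pvParent then pvScanB rest true "Ok" c2
    else pvScanB rest false c1 c2

def function_alt (device_output : String) : String × String × String × String :=
  let cs := pvScanB (PySem.Str.splitlines device_output) false "Failed" "Failed"
  let comments :=
    (if cs.1 ≠ "Ok" then ["Parent command not found"] else []) ++
    (if cs.2 ≠ "Ok" then ["Sub command not found"] else [])
  let comment := PySem.Str.join "\r\n" comments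
  let valid := if comments = [] then "Ok" else "Failed"
  (valid, comment, "", "")

-- ===== PRECONDITION & SPEC =====
def Spec_function (device_output : String) (out : String × String × String × String) : Prop := out = function_alt device_output
instance (device_output : String) (out : String × String × String × String) : Decidable (Spec_function device_output out) := by unfold Spec_function; infer_instance

-- ===== CLAIM (what is proved, stated in full; the proofs are below) =====
def Claim_equal_function : Prop := ∀ (device_output : String), Dom_function device_output → Spec_function device_output (function device_output)

-- ===== LEMMAS AND PROOFS =====

-- B's in-block scan is A's "collect then rescan": it folds the subcommand test over pvInnerA.
lemma scanB_block (rest : List String) (c1 c2 : String) :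
    pvScanB rest true c1 c2 =
      (c1, (pvInnerA rest).foldl (fun acc l => if PySem.Str.strip l = pvSub then "Ok" else acc) c2) := by
  induction rest generalizing c2 with
  | nil => simp [pvScanB, pvInnerA]
  | cons l rest ih =>
    by_cases h : PySem.Chars.startswith l.toList [' '] = true
    · simp [pvScanB, pvInnerA, PySem.Str.startswith, h, ih]
    · simp [pvScanB, pvInnerA, PySem.Str.startswith, h]

-- fold with a non-empty guard = fold (the guard is redundant)
lemma check2A_eq_foldl (sc : List String) :
    pvCheck2A sc = sc.foldl (fun acc l => if PySem.Str.strip l = pvSub then "Ok" else acc) "Failed" := by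
  cases sc <;> simp [pvCheck2A]

-- Main loop correspondence: scanning rest (suffix of all past a parent-free prefix),
-- A's outer loop + check2 rescan equals B's single scan.
lemma outer_eq_scan (pre rest : List String)
    (hpre : ∀ x ∈ pre, ¬ PySem.Str.strip x = pvParent) :
    ((pvOuterA (pre ++ rest) rest).1, pvCheck2A (pvOuterA (pre ++ rest) rest).2) =
      pvScanB rest false "Failed" "Failed" := by
  induction rest generalizing pre with
  | nil => simp [pvOuterA, pvScanB, pvCheck2A]
  | cons i rest ih =>
    by_cases h : PySem.Str.strip i = pvParent
    · have hnotmem : i ∉ pre := fun hm => hpre i hm h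
      have hidx : PySem.List.index? (pre ++ i :: rest) i = some pre.length := by
        rw [PySem.List.index?_eq_some_iff]
        exact ⟨pre, rest, rfl, rfl, hnotmem⟩
      have hslice : PySem.List.slice (pre ++ i :: rest) (some ((pre.length : Int) + 1)) none
          = rest := by
        have hc : ((pre.length : Int) + 1) = ((pre.length + 1 : Nat) : Int) := by push_cast; ring
        rw [hc, PySem.List.slice_from_natCast]
        rw [show pre ++ i :: rest = (pre ++ [i]) ++ rest by simp]
        rw [show pre.length + 1 = (pre ++ [i]).length by simp, List.drop_left]
      simp only [pvOuterA, pvScanB, h, if_true, hidx, hslice, Bool.false_eq_true, if_false,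
        check2A_eq_foldl]
      rw [scanB_block]
    · have step : pre ++ i :: rest = (pre ++ [i]) ++ rest := by simp
      have hpre' : ∀ x ∈ pre ++ [i], ¬ PySem.Str.strip x = pvParent := by
        intro x hx
        rcases List.mem_append.mp hx with hx | hx
        · exact hpre x hx
        · simp at hx; subst hx; exact h
      simp only [pvOuterA, pvScanB, h, Bool.false_eq_true, if_false]
      rw [step]
      exact ih (pre ++ [i]) hpre'

-- The comment/valid assembly tails agree for every pair of check values.
lemma tail_eq (c1 c2 : String) :
    (let check1 := c1
     let check2 := c2
     let comment : String := ""
     let valid : String := ""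
     let cv1 : String × String :=
       if check1 ≠ "Ok" then
         ((if comment = "" then "Parent command not found"
           else comment ++ "\r\n" ++ "Parent command not found"), "Failed")
       else (comment, valid)
     let cv2 : String × String :=
       if check2 ≠ "Ok" then
         ((if cv1.1 = "" then "Sub command not found"
           else cv1.1 ++ "\r\n" ++ "Sub command not found"), "Failed")
       else cv1
     let valid' := if check1 = "Ok" ∧ check2 = "Ok" then "Ok" else cv2.2
     ((valid', cv2.1, "", "") : String × String × String × String)) =
    (let comments :=
       (if c1 ≠ "Ok" then ["Parent command not found"] else []) ++
       (if c2 ≠ "Ok" then ["Sub command not found"] else [])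
     let comment := PySem.Str.join "\r\n" comments
     let valid := if comments = [] then "Ok" else "Failed"
     (valid, comment, "", "")) := by
  by_cases h1 : c1 = "Ok" <;> by_cases h2 : c2 = "Ok" <;>
    simp [h1, h2] <;> decide

-- ===== VERDICT (by name: the statement is the Claim_ definition above) =====
theorem function_spec : Claim_equal_function := by
  intro s _
  unfold Spec_function function function_alt
  have hmain := outer_eq_scan [] (PySem.Str.splitlines s) (by intro x hx; simp at hx)
  simp only [List.nil_append] at hmain
  have h1 : (pvOuterA (PySem.Str.splitlines s) (PySem.Str.splitlines s)).1
      = (pvScanB (PySem.Str.splitlines s) false "Failed" "Failed").1 := by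
    rw [← hmain]
  have h2 : pvCheck2A (pvOuterA (PySem.Str.splitlines s) (PySem.Str.splitlines s)).2
      = (pvScanB (PySem.Str.splitlines s) false "Failed" "Failed").2 := by
    rw [← hmain]
  simp only [← h1, ← h2]
  exact tail_eq _ _
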